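-- pv_equiv track=rewrite | github.com/Seungkyu-Han/BOJ | 프로그래머스/2/77885. 2개 이하로 다른 비트/2개 이하로 다른 비트.py | solution
-- ===== SOURCE A (Python) =====
-- def solution(numbers):
--     answer = []
--
--     for num in numbers:
--         result = 0
--
--         bin_arr = []
--
--         while num > 0:
--             bin_arr.append(num % 2)
--             num //= 2
--
--         index = -1
--
--         for i in range(len(bin_arr)):
--             if bin_arr[i] == 0:
--                 index = i
--                 break
--         if len(bin_arr) == 0:
--             result = 1
--
--         elif index == -1:
--             bin_arr[-1] = 0
--             bin_arr.append(1)
--             for i in range(len(bin_arr)):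
--                 result += (bin_arr[i] * (2 ** i))
--
--         else:
--             bin_arr[i] = 1
--             if i > 0:
--                 bin_arr[i - 1] = 0
--             for i in range(len(bin_arr)):
--                 result += (bin_arr[i] * (2 ** i))
--
--         answer.append(result)
--
--
--     return answer
-- ===== SOURCE B (Python) =====
-- def _lowz(num):
--     # position of the lowest zero bit of a nonnegative integer
--     return 0 if num % 2 == 0 else 1 + _lowz(num // 2)
--
--
-- def solution(numbers):
--     answer = []
--     for num in numbers:
--         if num % 2 == 0:
--             answer.append(num + 1)
--         else:
--             p = _lowz(num)
--             answer.append(num + (1 << (p - 1)))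
--     return answer
-- ===== Notes on version B (the rewrite author's own statement) =====
-- stated objective: alternative
-- what changed: Replaces A's per-number binary-list construction, linear scan for the first zero bit, list surgery and positional re-summation by the arithmetic identity: even num -> num+1, odd num -> num + 2^(p-1) where p is the lowest zero-bit position (no lists built; speed on the claimed domain was not verified, so no speed is claimed).
-- outside the precondition, e.g. on solution([-1]): A returns [1], B raises RecursionError; on solution([-2]): A returns [1], B returns [-1]
import Mathlib
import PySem

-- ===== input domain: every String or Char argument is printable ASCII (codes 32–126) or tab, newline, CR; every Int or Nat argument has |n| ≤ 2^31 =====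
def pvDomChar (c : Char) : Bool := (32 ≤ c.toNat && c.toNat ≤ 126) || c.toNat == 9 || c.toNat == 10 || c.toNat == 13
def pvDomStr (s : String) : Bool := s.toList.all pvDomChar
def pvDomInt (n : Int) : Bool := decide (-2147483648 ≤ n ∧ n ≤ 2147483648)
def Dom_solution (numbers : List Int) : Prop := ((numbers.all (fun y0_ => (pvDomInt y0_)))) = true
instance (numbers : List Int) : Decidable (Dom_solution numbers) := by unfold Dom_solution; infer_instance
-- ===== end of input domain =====

-- B replaces A's per-number bit-list construction, scan and re-summation by the
-- arithmetic identity (even -> num+1, odd -> num + 2^(p-1), p = lowest zero bit).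

-- ===== PORT A =====
-- while num > 0: bin_arr.append(num % 2); num //= 2
def binArr (num : Int) : List Int :=
  if _h : 0 < num then PySem.Int.mod num 2 :: binArr (PySem.Int.floordiv num 2) else []
termination_by num.toNat
decreasing_by
  rw [PySem.Int.floordiv_eq_ediv_of_pos (by omega)]
  omega

-- for i in range(len(bin_arr)): if bin_arr[i] == 0: index = i; break
def findZero : List Int → Int → Int
  | [], _ => -1
  | b :: t, i => if b = 0 then i else findZero t (i + 1)

-- result = 0; for i in range(len(ba)): result += ba[i] * 2 ** i
def sumBits (ba : List Int) : Int :=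
  ba.zipIdx.foldl (fun r p => r + p.1 * 2 ^ p.2) 0

def procA (num : Int) : Int :=
  let ba := binArr num
  let index := findZero ba 0
  if ba.length = 0 then 1
  else if index = -1 then
    sumBits (ba.set (ba.length - 1) 0 ++ [1])
  else
    let i := index.toNat
    let ba2 := ba.set i 1
    let ba3 := if 0 < i then ba2.set (i - 1) 0 else ba2
    sumBits ba3

def solution (numbers : List Int) : List Int :=
  numbers.foldl (fun answer num => answer ++ [procA num]) []

-- ===== PORT B =====
-- position of the lowest zero bit of a nonnegative integer (Source B's _lowz);
-- the n ≤ 0 guard only makes the recursion total: Source B does not return there (outside Pre_)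
def lowz (n : Int) : Nat :=
  if _h : n ≤ 0 then 0
  else if PySem.Int.mod n 2 = 0 then 0 else 1 + lowz (PySem.Int.floordiv n 2)
termination_by n.toNat
decreasing_by
  rw [PySem.Int.floordiv_eq_ediv_of_pos (by omega)]
  omega

def solution_alt (numbers : List Int) : List Int :=
  numbers.foldl
    (fun answer num =>
      if PySem.Int.mod num 2 = 0 then answer ++ [num + 1]
      else answer ++ [num + (1 : Int) <<< (lowz num - 1)]) []

-- ===== PRECONDITION & SPEC =====
-- Pre_ excludes lists with a negative element: there A's value 1 per element is an artefact of its
-- empty bit array, while B's bit rule gives num+1 for even negatives and its lowest-zero-bit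
-- recursion does not terminate (RecursionError) for odd negatives.
def Pre_solution (numbers : List Int) : Prop := ∀ x ∈ numbers, 0 ≤ x
instance (numbers : List Int) : Decidable (Pre_solution numbers) := by unfold Pre_solution; infer_instance
def pvWitness_solution : List Int := [5, 8, 0, 1023]

def Spec_solution (numbers : List Int) (out : List Int) : Prop := out = solution_alt numbers
instance (numbers : List Int) (out : List Int) : Decidable (Spec_solution numbers out) := by unfold Spec_solution; infer_instance

-- ===== CLAIM (what is proved, stated in full; the proofs are below) =====
def Claim_equal_solution : Prop := ∀ (numbers : List Int), Dom_solution numbers → Pre_solution numbers → Spec_solution numbers (solution numbers)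

-- ===== LEMMAS AND PROOFS =====

-- Horner view of the bit list (proof-side only)
def hr : List Int → Int
  | [] => 0
  | b :: t => b + 2 * hr t

theorem sumBits_aux (xs : List Int) : ∀ (k : Nat) (acc : Int),
    (xs.zipIdx k).foldl (fun r p => r + p.1 * 2 ^ p.2) acc = acc + 2 ^ k * hr xs := by
  induction xs with
  | nil => intro k acc; simp [hr]
  | cons b t ih =>
      intro k acc
      simp only [List.zipIdx_cons, List.foldl_cons, ih, hr, pow_succ]
      ring

theorem sumBits_eq_hr (xs : List Int) : sumBits xs = hr xs := by
  simpa using sumBits_aux xs 0 0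

theorem binArr_pos {n : Int} (h : 0 < n) :
    binArr n = PySem.Int.mod n 2 :: binArr (PySem.Int.floordiv n 2) := by
  rw [binArr]; simp [h]

theorem binArr_nonpos {n : Int} (h : ¬ 0 < n) : binArr n = [] := by
  rw [binArr]; simp [h]

theorem findZero_lb (t : List Int) : ∀ k : Int, k ≤ findZero t k ∨ findZero t k = -1 := by
  induction t with
  | nil => intro k; simp [findZero]
  | cons b t ih =>
      intro k
      by_cases hb : b = 0
      · simp [findZero, hb]
      · simp only [findZero, if_neg hb]
        rcases ih (k + 1) with h | h
        · left; omega
        · right; exact h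

theorem findZero_shift (t : List Int) : ∀ k : Int,
    findZero t k = if findZero t 0 = -1 then -1 else findZero t 0 + k := by
  induction t with
  | nil => intro k; simp [findZero]
  | cons b t ih =>
      intro k
      by_cases hb : b = 0
      · simp [findZero, hb]
      · have hlb := findZero_lb t 0
        simp only [findZero, if_neg hb, ih (k + 1), ih (0 + 1)]
        split_ifs <;> omega

theorem hr_binArr (N : Nat) : ∀ n : Int, n.toNat = N → 0 ≤ n → hr (binArr n) = n := by
  induction N using Nat.strong_induction_on with
  | _ N ih =>
    intro n hN hn
    by_cases hpos : 0 < n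
    · have hdiv : PySem.Int.floordiv n 2 = n / 2 := PySem.Int.floordiv_eq_ediv_of_pos (by omega)
      have hmod : PySem.Int.mod n 2 = n % 2 := PySem.Int.mod_eq_emod_of_pos (by omega)
      rw [binArr_pos hpos, hr, ih (PySem.Int.floordiv n 2).toNat (by omega) _ rfl (by omega)]
      omega
    · rw [binArr_nonpos hpos, hr]; omega

theorem findZero_cons_ne (b : Int) (u : List Int) (hb : b ≠ 0) : findZero (b :: u) 0 ≠ 0 := by
  have := findZero_lb u 0
  simp only [findZero, if_neg hb]
  rw [findZero_shift u (0 + 1)]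
  split_ifs <;> omega

theorem procA_eq (N : Nat) : ∀ n : Int, n.toNat = N → 0 ≤ n →
    procA n = n + 2 ^ (lowz n - 1) := by
  induction N using Nat.strong_induction_on with
  | _ N ih =>
    intro n hN hn
    by_cases hpos : 0 < n
    · -- n > 0
      set m := PySem.Int.floordiv n 2 with hm
      set r := PySem.Int.mod n 2 with hr2
      have hdiv : m = n / 2 := by rw [hm, PySem.Int.floordiv_eq_ediv_of_pos (by omega)]
      have hmod : r = n % 2 := by rw [hr2, PySem.Int.mod_eq_emod_of_pos (by omega)]
      have hm0 : 0 ≤ m := by omega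
      have hmn : m < n := by omega
      have hsum : n = 2 * m + r := by omega
      have hr01 : r = 0 ∨ r = 1 := by omega
      have hba : binArr n = r :: binArr m := binArr_pos hpos
      have ihm : procA m = m + 2 ^ (lowz m - 1) := ih m.toNat (by omega) m rfl hm0
      have hlen : ¬ (binArr n).length = 0 := by rw [hba]; simp
      rcases hr01 with hre | hro
      · -- n even
        have hmz : PySem.Int.mod n 2 = 0 := by omega
        have hlz : lowz n = 0 := by rw [lowz, dif_neg (show ¬ n ≤ 0 by omega), if_pos hmz]
        have hfz : findZero (binArr n) 0 = 0 := by rw [hba, hre]; simp [findZero]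
        have hm' : hr (binArr m) = m := hr_binArr m.toNat m rfl hm0
        have e1 : procA n = sumBits ((binArr n).set 0 1) := by
          simp only [procA]
          rw [if_neg hlen, if_neg (by rw [hfz]; norm_num), hfz]
          norm_num
        rw [e1, hba, hre, List.set_cons_zero, sumBits_eq_hr, hr, hm', hlz]
        norm_num; omega
      · -- n odd
        have hmz : ¬ PySem.Int.mod n 2 = 0 := by omega
        have hlzn : lowz n = 1 + lowz m := by rw [lowz, dif_neg (show ¬ n ≤ 0 by omega), if_neg hmz, ← hm]
        by_cases hm0' : m = 0
        · have hn1 : n = 1 := by omega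
          have hb1 : binArr (1 : Int) = [1] := by
            rw [binArr_pos (by norm_num), binArr_nonpos (by decide)]
            decide
          have hl1 : lowz (1 : Int) = 1 := by
            rw [lowz, dif_neg (by decide), if_neg (by decide), lowz, dif_pos (by decide)]
          rw [hn1]
          simp only [procA, hb1]
          rw [hl1]
          decide
        · have hmpos : 0 < m := by omega
          set t := binArr m with ht
          have htne : t ≠ [] := by rw [ht, binArr_pos hmpos]; simp
          set z := findZero t 0 with hz0
          have hlb : 0 ≤ z ∨ z = -1 := by
            have := findZero_lb t 0
            rw [← hz0] at this
            omega
          have hfzn : findZero (binArr n) 0 = if z = -1 then -1 else z + 1 := by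
            have h1 : findZero (binArr n) 0 = findZero t (0 + 1) := by
              rw [hba, hro]; simp [findZero]
            rw [h1, findZero_shift t (0 + 1), ← hz0]
            norm_num
          have hmb : 0 ≤ PySem.Int.mod m 2 ∧ PySem.Int.mod m 2 ≤ 1 := by
            rw [PySem.Int.mod_eq_emod_of_pos (by omega)]; omega
          by_cases hz : z = -1
          · -- all ones: index == -1 branch for both n and m
            have e1 : procA n = sumBits ((binArr n).set ((binArr n).length - 1) 0 ++ [1]) := by
              simp only [procA]
              rw [if_neg hlen, if_pos (by rw [hfzn, if_pos hz])]
            have e2 : procA m = sumBits (t.set (t.length - 1) 0 ++ [1]) := by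
              simp only [procA]
              rw [← ht, ← hz0, if_neg (by simpa using htne), if_pos hz]
            have hmodd : ¬ PySem.Int.mod m 2 = 0 := by
              intro hcon
              have : z = 0 := by rw [hz0, ht, binArr_pos hmpos, hcon]; simp [findZero]
              omega
            have hlzm : 1 ≤ lowz m := by rw [lowz, dif_neg (show ¬ m ≤ 0 by omega), if_neg hmodd]; omega
            have hlt : t.length = (t.length - 1) + 1 := by
              have : t.length ≠ 0 := by rw [ht, binArr_pos hmpos]; simp
              omega
            have hA : procA n = 1 + 2 * procA m := by
              rw [e1, e2, hba, hro, show (((1:Int) :: t).length - 1) = t.length by simp,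
                hlt, List.set_cons_succ, List.cons_append, sumBits_eq_hr, sumBits_eq_hr, hr, ← hlt]
            rw [hA, ihm, hlzn,
              show (2:Int) ^ (1 + lowz m - 1) = 2 * 2 ^ (lowz m - 1) by
                rw [show 1 + lowz m - 1 = (lowz m - 1) + 1 by omega, pow_succ]; ring,
              show n = 2 * m + 1 by omega]
            ring
          · -- a zero bit exists in t: index = z + 1 ≥ 1
            have hzge : 0 ≤ z := by omega
            have hfzn' : findZero (binArr n) 0 = z + 1 := by rw [hfzn, if_neg hz]
            have hiN : (z + 1).toNat = z.toNat + 1 := by omega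
            have e1 : procA n = sumBits (((binArr n).set (z.toNat + 1) 1).set z.toNat 0) := by
              simp only [procA]
              rw [if_neg hlen, if_neg (by rw [hfzn']; omega), hfzn', hiN,
                if_pos (by omega : 0 < z.toNat + 1)]
              norm_num
            by_cases hr'0 : PySem.Int.mod m 2 = 0
            · -- m even: z = 0
              have hz0' : z = 0 := by rw [hz0, ht, binArr_pos hmpos, hr'0]; simp [findZero]
              have hlzm : lowz m = 0 := by rw [lowz, dif_neg (show ¬ m ≤ 0 by omega), if_pos hr'0]
              have e2 : procA m = sumBits (t.set 0 1) := by
                simp only [procA]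
                rw [← ht, ← hz0, if_neg (by simpa using htne), if_neg hz, hz0']
                norm_num
              have hA : procA n = 2 * procA m := by
                rw [e1, e2, hba, hro, hz0']
                norm_num [List.set_cons_succ, sumBits_eq_hr, hr]
              rw [hA, ihm, hlzn, hlzm, show n = 2 * m + 1 by omega]
              norm_num; ring
            · -- m odd: z ≥ 1
              have hz1 : 1 ≤ z := by
                have h := findZero_cons_ne (PySem.Int.mod m 2) (binArr (PySem.Int.floordiv m 2)) hr'0
                rw [← binArr_pos hmpos, ← ht, ← hz0] at h
                omega
              obtain ⟨k, hk⟩ : ∃ k, z.toNat = k + 1 := ⟨z.toNat - 1, by omega⟩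
              have hlzm : 1 ≤ lowz m := by rw [lowz, dif_neg (show ¬ m ≤ 0 by omega), if_neg hr'0]; omega
              have e2 : procA m = sumBits ((t.set (k + 1) 1).set k 0) := by
                simp only [procA]
                rw [← ht, ← hz0, if_neg (by simpa using htne), if_neg hz,
                  if_pos (by omega : 0 < z.toNat), hk]
                norm_num
              have hA : procA n = 1 + 2 * procA m := by
                rw [e1, e2, hba, hro, hk, List.set_cons_succ, List.set_cons_succ,
                  sumBits_eq_hr, sumBits_eq_hr, hr]
              rw [hA, ihm, hlzn,
                show (2:Int) ^ (1 + lowz m - 1) = 2 * 2 ^ (lowz m - 1) by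
                  rw [show 1 + lowz m - 1 = (lowz m - 1) + 1 by omega, pow_succ]; ring,
                show n = 2 * m + 1 by omega]
              ring
    · -- n = 0
      have h0 : n = 0 := le_antisymm (not_lt.mp hpos) hn
      subst h0
      simp [procA, binArr_nonpos (by omega), lowz]

theorem procB_eq (n : Int) (_hn : 0 ≤ n) :
    (if PySem.Int.mod n 2 = 0 then n + 1 else n + (1 : Int) <<< (lowz n - 1))
      = n + 2 ^ (lowz n - 1) := by
  by_cases he : PySem.Int.mod n 2 = 0
  · have hlz : lowz n = 0 := by
      rw [lowz]; split_ifs <;> simp_all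
    rw [if_pos he, hlz]; norm_num
  · rw [if_neg he, Int.shiftLeft_eq, one_mul]

-- ===== VERDICT (by name: the statement is the Claim_ definition above) =====
theorem fold_eq (ns : List Int) : ∀ acc : List Int, (∀ x ∈ ns, 0 ≤ x) →
    ns.foldl (fun answer num => answer ++ [procA num]) acc =
      ns.foldl (fun answer num =>
        if PySem.Int.mod num 2 = 0 then answer ++ [num + 1]
        else answer ++ [num + (1 : Int) <<< (lowz num - 1)]) acc := by
  induction ns with
  | nil => intro acc _; rfl
  | cons x t ih =>
      intro acc h
      have hx : 0 ≤ x := h x (by simp)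
      have hxval : procA x =
          if PySem.Int.mod x 2 = 0 then x + 1 else x + (1 : Int) <<< (lowz x - 1) :=
        (procA_eq x.toNat x rfl hx).trans (procB_eq x hx).symm
      simp only [List.foldl_cons, hxval]
      split_ifs with hc
      · exact ih _ (fun y hy => h y (by simp [hy]))
      · exact ih _ (fun y hy => h y (by simp [hy]))

theorem solution_spec : Claim_equal_solution := by
  intro numbers _ hpre
  unfold Spec_solution solution solution_alt
  exact fold_eq numbers [] hpre
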